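-- pv_equiv track=rewrite | github.com/mrtnzrm2/ELK | various/network_tools.py | reverse_cover
-- ===== SOURCE A (Python) =====
-- def reverse_cover(cover: dict, labels):
--   cover_indices = set()
--   for k, v in cover.items():
--     cover_indices = cover_indices.union(set(v))
--   rev = {k : [] for k in cover_indices}
--   for k, v in cover.items():
--     for vv in v:
--       rev[vv].append(labels[k])
--   return rev
-- ===== SOURCE B (Python) =====
-- def reverse_cover(cover: dict, labels):
--   pairs = [(vv, labels[k]) for k, v in cover.items() for vv in v]
--   return {key: [lab for kk, lab in pairs if kk == key]
--           for key in dict.fromkeys(kk for kk, _ in pairs)}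
-- ===== Notes on version B (the rewrite author's own statement) =====
-- stated objective: alternative
-- what changed: B replaces A's set-gathering pass plus mutating nested append loop by a declarative flatten-then-group-by: it first materialises the flat (value, label) pair list, then builds each output list with a filtering comprehension per distinct key (dict.fromkeys keeps first-encounter order).
import Mathlib
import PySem

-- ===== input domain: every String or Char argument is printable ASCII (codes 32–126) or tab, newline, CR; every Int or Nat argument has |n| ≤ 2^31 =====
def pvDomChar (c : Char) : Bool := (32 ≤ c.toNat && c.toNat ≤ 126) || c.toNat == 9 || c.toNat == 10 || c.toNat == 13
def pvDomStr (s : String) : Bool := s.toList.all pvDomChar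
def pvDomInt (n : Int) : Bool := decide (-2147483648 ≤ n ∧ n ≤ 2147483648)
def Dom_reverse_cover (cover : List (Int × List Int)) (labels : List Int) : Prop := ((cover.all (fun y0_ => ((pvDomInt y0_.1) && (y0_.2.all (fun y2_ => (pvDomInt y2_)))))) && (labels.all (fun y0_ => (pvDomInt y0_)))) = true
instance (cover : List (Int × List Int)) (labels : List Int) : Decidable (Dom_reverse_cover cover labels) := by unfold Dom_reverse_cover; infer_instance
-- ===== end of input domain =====

-- B flattens cover into a (value, label) pair list and groups it by a filtering
-- comprehension per distinct key, replacing A's set-gathering pass and mutating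
-- nested append loop (objective: alternative; not faster).
-- Python dict equality ignores key order; both ports emit keys in first-encounter order.

-- ===== PORT A =====
def reverse_cover (cover : List (Int × List Int)) (labels : List Int) : List (Int × List Int) :=
  -- cover_indices = set(); for k, v in cover.items(): cover_indices = cover_indices.union(set(v))
  let coverIndices : PySem.Set Int :=
    cover.foldl (fun s kv => PySem.Set.union s (PySem.Set.ofList kv.2)) PySem.Set.empty
  -- rev = {k : [] for k in cover_indices}
  let rev : PySem.Dict Int (List Int) :=
    PySem.Dict.ofList (coverIndices.map (fun k => (k, ([] : List Int))))
  -- for k, v in cover.items(): for vv in v: rev[vv].append(labels[k])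
  -- (labels[k] is total here via pyGetD; Pre_ requires the index in range wherever it is evaluated)
  let rev :=
    cover.foldl (fun d kv =>
      kv.2.foldl (fun d vv =>
        d.modify vv [] (fun l => l ++ [PySem.List.pyGetD labels kv.1 0])) d) rev
  rev.items

-- ===== PORT B =====
def reverse_cover_alt (cover : List (Int × List Int)) (labels : List Int) : List (Int × List Int) :=
  -- pairs = [(vv, labels[k]) for k, v in cover.items() for vv in v]
  let pairs : List (Int × Int) :=
    cover.flatMap (fun kv => kv.2.map (fun vv => (vv, PySem.List.pyGetD labels kv.1 0)))
  -- {key: [lab for kk, lab in pairs if kk == key] for key in dict.fromkeys(kk for kk, _ in pairs)}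
  -- dict.fromkeys over the keys = distinct keys in first-encounter order = PySem.Set.ofList
  (PySem.Set.ofList (pairs.map Prod.fst)).map
    (fun key => (key, (pairs.filter (fun p => p.1 == key)).map Prod.snd))

-- ===== PRECONDITION & SPEC =====
-- Pre_ excludes exactly the inputs where the Python A raises IndexError: a cover item with a
-- nonempty value list whose key is not a valid (possibly negative) index into labels.
def Pre_reverse_cover (cover : List (Int × List Int)) (labels : List Int) : Prop :=
  ∀ kv ∈ cover, kv.2 ≠ [] → PySem.Raise.InRange labels.length kv.1
instance (cover : List (Int × List Int)) (labels : List Int) : Decidable (Pre_reverse_cover cover labels) := by unfold Pre_reverse_cover; infer_instance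

def pvWitness_reverse_cover : (List (Int × List Int)) × List Int :=
  ([(0, [1, 2]), (1, [2])], [10, 20])

def Spec_reverse_cover (cover : List (Int × List Int)) (labels : List Int) (out : List (Int × List Int)) : Prop := out = reverse_cover_alt cover labels
instance (cover : List (Int × List Int)) (labels : List Int) (out : List (Int × List Int)) : Decidable (Spec_reverse_cover cover labels out) := by unfold Spec_reverse_cover; infer_instance

-- ===== CLAIM (what is proved, stated in full; the proofs are below) =====
def Claim_equal_reverse_cover : Prop := ∀ (cover : List (Int × List Int)) (labels : List Int), Dom_reverse_cover cover labels → Pre_reverse_cover cover labels → Spec_reverse_cover cover labels (reverse_cover cover labels)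

-- ===== LEMMAS AND PROOFS =====

-- The flattened stream of (value-key, appended label) pairs; B computes it literally
-- and A's nested loop performs exactly these modify operations in this order.
def rcOps (cover : List (Int × List Int)) (labels : List Int) : List (Int × Int) :=
  cover.flatMap (fun kv => kv.2.map (fun vv => (vv, PySem.List.pyGetD labels kv.1 0)))

-- A's nested loop is the flat fold over rcOps.
theorem rc_nested_eq_flat (cover : List (Int × List Int)) (labels : List Int)
    (d : PySem.Dict Int (List Int)) :
    cover.foldl (fun d kv =>
      kv.2.foldl (fun d vv =>
        d.modify vv [] (fun l => l ++ [PySem.List.pyGetD labels kv.1 0])) d) d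
    = (rcOps cover labels).foldl (fun d p => d.modify p.1 [] (fun l => l ++ [p.2])) d := by
  induction cover generalizing d with
  | nil => rfl
  | cons kv rest ih =>
    simp only [rcOps, List.flatMap_cons, List.foldl_append, List.foldl_cons, List.foldl_map] at *
    rw [ih]

-- A's set-building loop collects exactly the distinct operation keys, in first-encounter order.
theorem rc_indices_eq (cover : List (Int × List Int)) (labels : List Int) :
    cover.foldl (fun s kv => PySem.Set.union s (PySem.Set.ofList kv.2)) PySem.Set.empty
    = PySem.Set.ofList ((rcOps cover labels).map Prod.fst) := by
  have key : ∀ (s : PySem.Set Int),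
      cover.foldl (fun s kv => PySem.Set.union s (PySem.Set.ofList kv.2)) s
      = PySem.Set.update s ((rcOps cover labels).map Prod.fst) := by
    induction cover with
    | nil => intro s; rfl
    | cons kv rest ih =>
      intro s
      simp only [rcOps, List.flatMap_cons, List.map_append, List.map_map, List.foldl_cons] at *
      rw [ih, PySem.Set.update_append]
      congr 1
      have hu : PySem.Set.union (α := Int) = PySem.Set.update := rfl
      have hm : List.map (Prod.fst ∘ fun vv => (vv, PySem.List.pyGetD labels kv.1 0)) kv.2
          = kv.2 := by simp [Function.comp_def]
      rw [hu, hm]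
      rw [PySem.Set.update_eq_append_filter, PySem.Set.update_eq_append_filter,
        PySem.Set.ofList_ofList]
  rw [key]; rfl

-- Seeding with (k, []) over nodup keys gives the literal items list.
theorem rc_seed_items (ks : List Int) (hk : ks.Nodup) :
    (PySem.Dict.ofList (ks.map (fun k => (k, ([] : List Int))))).items
      = ks.map (fun k => (k, ([] : List Int))) := by
  have : PySem.Dict.ofList (ks.map (fun k => (k, ([] : List Int))))
      = (ks.map (fun k => (k, ([] : List Int)))).foldl
          (fun d p => d.insert p.1 p.2) PySem.Dict.empty := rfl
  rw [this]
  have h := PySem.Dict.items_foldl_insert_fresh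
    (l := ks.map (fun k => (k, ([] : List Int)))) (k := Prod.fst) (v := Prod.snd)
    (d := PySem.Dict.empty)
    (by intro a _; exact PySem.Dict.contains_empty _)
    (by simpa [List.map_map, Function.comp_def] using hk)
  simpa [List.map_map, Function.comp_def] using h

-- The seed dict returns [] at every key.
theorem rc_seed_getD_aux (pairs : List (Int × List Int)) (d : PySem.Dict Int (List Int))
    (hv : ∀ p ∈ pairs, p.2 = ([] : List Int)) (hd : ∀ c, d.getD c [] = [])
    (c : Int) :
    (pairs.foldl (fun d p => d.insert p.1 p.2) d).getD c [] = [] := by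
  induction pairs generalizing d with
  | nil => exact hd c
  | cons p rest ih =>
    simp only [List.foldl_cons]
    refine ih _ (fun q hq => hv q (List.mem_cons_of_mem _ hq)) ?_
    intro c'
    rw [PySem.Dict.getD_insert]
    split_ifs with h
    · exact hv p (List.mem_cons_self)
    · exact hd c'

theorem rc_seed_getD (ks : List Int) (c : Int) :
    (PySem.Dict.ofList (ks.map (fun k => (k, ([] : List Int))))).getD c [] = [] := by
  have hof : PySem.Dict.ofList (ks.map (fun k => (k, ([] : List Int))))
      = (ks.map (fun k => (k, ([] : List Int)))).foldl
          (fun d p => d.insert p.1 p.2) PySem.Dict.empty := rfl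
  rw [hof]
  refine rc_seed_getD_aux _ _ ?_ ?_ c
  · intro p hp; rcases List.mem_map.mp hp with ⟨k, _, rfl⟩; rfl
  · intro c'; exact PySem.Dict.getD_empty c' []

-- Set.update of a set by its own source list changes nothing.
theorem rc_update_self (xs : List Int) :
    PySem.Set.update (PySem.Set.ofList xs) xs = PySem.Set.ofList xs := by
  rw [PySem.Set.update_eq_append_filter]
  have : (PySem.Set.ofList xs).filter
      (fun y => !(PySem.Set.contains (PySem.Set.ofList xs) y)) = [] := by
    rw [List.filter_eq_nil_iff]
    intro y hy
    simp only [PySem.Set.mem_ofList] at hy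
    simp [hy]
  rw [this, List.append_nil]

-- Main: the items of A's modify-fold from the pre-seeded dict are exactly
-- B's group-by: distinct op keys in first-encounter order, each with the
-- filtered labels.
theorem rc_main (ops : List (Int × Int)) :
    ((ops.foldl (fun d p => d.modify p.1 [] (fun l => l ++ [p.2]))
        (PySem.Dict.ofList ((PySem.Set.ofList (ops.map Prod.fst)).map
          (fun k => (k, ([] : List Int)))))).items)
    = (PySem.Set.ofList (ops.map Prod.fst)).map
        (fun key => (key, (ops.filter (fun p => p.1 == key)).map Prod.snd)) := by
  have hseedkeys :
      (PySem.Dict.ofList ((PySem.Set.ofList (ops.map Prod.fst)).map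
        (fun k => (k, ([] : List Int))))).keys = PySem.Set.ofList (ops.map Prod.fst) := by
    simp only [PySem.Dict.keys]
    rw [rc_seed_items _ (PySem.Set.nodup_ofList _)]
    simp [Function.comp_def]
  have hnod := PySem.Dict.nodup_keys_foldl_modify_key ops Prod.fst []
    (fun _ p => (fun l => l ++ [p.2]))
    (PySem.Dict.ofList ((PySem.Set.ofList (ops.map Prod.fst)).map
      (fun k => (k, ([] : List Int)))))
    (by rw [hseedkeys]; exact PySem.Set.nodup_ofList _)
  rw [PySem.Dict.items_eq_map_keys _ hnod ([] : List Int)]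
  rw [PySem.Dict.keys_foldl_modify_key, hseedkeys, rc_update_self]
  refine List.map_congr_left ?_
  intro k _
  rw [PySem.Dict.getD_foldl_modify_append, rc_seed_getD]
  rfl

theorem reverse_cover_spec : Claim_equal_reverse_cover := by
  intro cover labels _ _
  unfold Spec_reverse_cover
  have hA : reverse_cover cover labels
      = ((cover.foldl (fun d kv =>
          kv.2.foldl (fun d vv =>
            d.modify vv [] (fun l => l ++ [PySem.List.pyGetD labels kv.1 0])) d)
          (PySem.Dict.ofList
            ((cover.foldl (fun s kv => PySem.Set.union s (PySem.Set.ofList kv.2))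
                PySem.Set.empty).map (fun k => (k, ([] : List Int)))))).items) := rfl
  have hB : reverse_cover_alt cover labels
      = (PySem.Set.ofList ((rcOps cover labels).map Prod.fst)).map
          (fun key => (key, ((rcOps cover labels).filter (fun p => p.1 == key)).map Prod.snd)) := rfl
  rw [hA, hB, rc_indices_eq cover labels, rc_nested_eq_flat, rc_main]
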